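-- pv_equiv track=rewrite | github.com/pc5401/my_BOJ | 백준/Gold/1377. 버블 소트/버블 소트.py | solve
-- ===== SOURCE A (Python) =====
-- def solve(N: int, A: list[int]) -> int:
--     arr = [(val, idx) for idx, val in enumerate(A, start=1)]
--     arr.sort(key=lambda x: x[0])
--     max_disp = 0
--     for sorted_pos, (_, orig_idx) in enumerate(arr, start=1):
--         disp = orig_idx - sorted_pos
--         if disp > max_disp:
--             max_disp = disp
--     return max_disp + 1
-- ===== SOURCE B (Python) =====
-- def solve(N: int, A: list[int]) -> int:
--     n = len(A)
--     best = 0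
--     for i in range(n):
--         d = 0
--         for j in range(i):
--             if A[j] > A[i]:
--                 d += 1
--         for j in range(i + 1, n):
--             if A[j] < A[i]:
--                 d -= 1
--         if d > best:
--             best = d
--     return best + 1
-- ===== Notes on version B (the rewrite author's own statement) =====
-- stated objective: alternative
-- what changed: B does no sorting at all: for each element it directly counts earlier elements that are greater and later elements that are smaller, whose difference equals that element's bubble-sort displacement, and takes the maximum of these counts plus one.
import Mathlib
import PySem

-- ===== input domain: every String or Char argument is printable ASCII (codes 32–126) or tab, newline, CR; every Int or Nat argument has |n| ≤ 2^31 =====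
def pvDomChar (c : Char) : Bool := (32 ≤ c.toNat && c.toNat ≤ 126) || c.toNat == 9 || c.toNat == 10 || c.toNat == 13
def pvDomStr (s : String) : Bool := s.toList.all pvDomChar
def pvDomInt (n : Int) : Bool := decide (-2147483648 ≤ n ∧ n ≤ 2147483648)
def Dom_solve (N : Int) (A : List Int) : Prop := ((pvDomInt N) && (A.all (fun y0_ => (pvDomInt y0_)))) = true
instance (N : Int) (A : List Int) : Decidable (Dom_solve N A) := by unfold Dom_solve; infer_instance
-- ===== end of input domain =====

-- B does no sorting: it counts, per element, earlier-greater and later-smaller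
-- elements, whose difference is that element's displacement (objective: alternative).

-- ===== PORT A =====
def solve (N : Int) (A : List Int) : Int :=
  let arr := (PySem.List.enumerate A 1).map (fun p => (p.2, p.1))
  let arrS := PySem.List.sorted arr (fun x => x.1) false
  let maxd := (PySem.List.enumerate arrS 1).foldl
      (fun m q => if q.2.2 - q.1 > m then q.2.2 - q.1 else m) 0
  maxd + 1

-- ===== PORT B =====
def solve_alt (N : Int) (A : List Int) : Int :=
  let n : Int := A.length
  let best := (PySem.List.pyRange 0 n 1).foldl (fun best i =>
    let d : Int := (PySem.List.pyRange 0 i 1).foldl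
      (fun d j => if PySem.List.pyGetD A j 0 > PySem.List.pyGetD A i 0 then d + 1 else d) 0
    let d : Int := (PySem.List.pyRange (i + 1) n 1).foldl
      (fun d j => if PySem.List.pyGetD A j 0 < PySem.List.pyGetD A i 0 then d - 1 else d) d
    if d > best then d else best) 0
  best + 1

-- ===== PRECONDITION & SPEC =====
def Spec_solve (N : Int) (A : List Int) (out : Int) : Prop := out = solve_alt N A
instance (N : Int) (A : List Int) (out : Int) : Decidable (Spec_solve N A out) := by unfold Spec_solve; infer_instance

-- ===== CLAIM (what is proved, stated in full; the proofs are below) =====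
def Claim_equal_solve : Prop := ∀ (N : Int) (A : List Int), Dom_solve N A → Spec_solve N A (solve N A)

-- ===== LEMMAS AND PROOFS =====

-- strict lexicographic order on (value, original index) pairs, as a Bool
def pvLex (a b : Int × Int) : Bool := a.1 < b.1 || (a.1 == b.1 && a.2 < b.2)

theorem pvLex_irrefl (a : Int × Int) : pvLex a a = false := by
  simp [pvLex]

theorem pvLex_asymm {a b : Int × Int} (h : pvLex a b = true) : pvLex b a = false := by
  rw [Bool.eq_false_iff]
  intro hba
  simp only [pvLex, Bool.or_eq_true, Bool.and_eq_true, decide_eq_true_eq, beq_iff_eq] at h hba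
  omega

-- inserting x (whose index exceeds every index in ys) into a lex-sorted ys keeps it lex-sorted
theorem pv_insert_pairwise (x : Int × Int) (ys : List (Int × Int))
    (hp : ys.Pairwise (fun a b => pvLex a b = true))
    (hidx : ∀ y ∈ ys, y.2 < x.2) :
    (PySem.List.insertBy (fun a b => decide (a.1 < b.1)) x ys).Pairwise
      (fun a b => pvLex a b = true) := by
  induction ys with
  | nil => simp [PySem.List.insertBy]
  | cons y ys ih =>
    rw [List.pairwise_cons] at hp
    by_cases hc : x.1 < y.1
    · have hrw : PySem.List.insertBy (fun a b => decide (a.1 < b.1)) x (y :: ys) = x :: y :: ys := by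
        simp [PySem.List.insertBy, hc]
      rw [hrw, List.pairwise_cons]
      refine ⟨?_, List.pairwise_cons.mpr hp⟩
      intro z hz
      rcases List.mem_cons.mp hz with hz | hz
      · subst hz
        simp only [pvLex, Bool.or_eq_true, decide_eq_true_eq]
        left; omega
      · have hyz := hp.1 z hz
        simp only [pvLex, Bool.or_eq_true, Bool.and_eq_true, decide_eq_true_eq, beq_iff_eq] at hyz ⊢
        left; omega
    · have hrw : PySem.List.insertBy (fun a b => decide (a.1 < b.1)) x (y :: ys)
          = y :: PySem.List.insertBy (fun a b => decide (a.1 < b.1)) x ys := by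
        simp [PySem.List.insertBy, hc]
      rw [hrw, List.pairwise_cons]
      refine ⟨?_, ih hp.2 (fun z hz => hidx z (List.mem_cons_of_mem _ hz))⟩
      intro z hz
      rcases (PySem.List.mem_insertBy _ _ _ _).mp hz with hz | hz
      · rw [hz]
        have hy : y.2 < x.2 := hidx y List.mem_cons_self
        simp only [pvLex, Bool.or_eq_true, Bool.and_eq_true, decide_eq_true_eq, beq_iff_eq]
        by_cases he : y.1 = x.1
        · right; exact ⟨he, by omega⟩
        · left; omega
      · exact hp.1 z hz

-- the insertion-sort fold over a list of pairs with strictly increasing indices is lex-sorted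
theorem pv_fold_pairwise (l : List (Int × Int)) (acc : List (Int × Int))
    (hacc : acc.Pairwise (fun a b => pvLex a b = true))
    (hsep : ∀ a ∈ acc, ∀ x ∈ l, a.2 < x.2)
    (hl : l.Pairwise (fun a b => a.2 < b.2)) :
    (l.foldl (fun acc x => PySem.List.insertBy (fun a b => decide (a.1 < b.1)) x acc) acc).Pairwise
      (fun a b => pvLex a b = true) := by
  induction l generalizing acc with
  | nil => exact hacc
  | cons x xs ih =>
    rw [List.pairwise_cons] at hl
    rw [List.foldl_cons]
    apply ih _ (pv_insert_pairwise x acc hacc (fun y hy => hsep y hy x List.mem_cons_self))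
    · intro a ha z hz
      rcases (PySem.List.mem_insertBy _ _ _ _).mp ha with ha | ha
      · rw [ha]; exact hl.1 z hz
      · exact hsep a ha z (List.mem_cons_of_mem _ hz)
    · exact hl.2

-- a stable sort on the first component of index-increasing pairs is lex-sorted
theorem pv_sorted_pairwise (arr : List (Int × Int)) (h : arr.Pairwise (fun a b => a.2 < b.2)) :
    (PySem.List.sorted arr (fun x => x.1) false).Pairwise (fun a b => pvLex a b = true) := by
  rw [PySem.List.sorted_eq_foldl_insertBy]
  exact pv_fold_pairwise arr [] List.Pairwise.nil (by simp) h

-- in a lex-sorted list, an element's position is the count of lex-smaller elements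
theorem pv_pos_countP (s : List (Int × Int))
    (hp : s.Pairwise (fun a b => pvLex a b = true)) (p : Nat) (hlt : p < s.length) :
    s.countP (fun y => pvLex y s[p]) = p := by
  have hpe := List.pairwise_iff_getElem.mp hp
  obtain ⟨e, he⟩ : ∃ e, s[p] = e := ⟨s[p], rfl⟩
  rw [he]
  have hsplit : s.countP (fun y => pvLex y e)
      = (s.take p).countP (fun y => pvLex y e) + (s.drop p).countP (fun y => pvLex y e) := by
    conv_lhs => rw [← List.take_append_drop p s]
    exact List.countP_append ..
  rw [hsplit]
  have h1 : (s.take p).countP (fun y => pvLex y e) = p := by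
    rw [List.countP_eq_length.mpr, List.length_take]
    · omega
    · intro a ha
      rcases List.mem_iff_getElem.mp ha with ⟨k, hk, rfl⟩
      have hk' : k < p := by
        have := hk; rw [List.length_take] at this; omega
      rw [List.getElem_take, ← he]
      exact hpe k p (by omega) hlt (by omega)
  have h2 : (s.drop p).countP (fun y => pvLex y e) = 0 := by
    rw [List.countP_eq_zero]
    intro a ha
    rcases List.mem_iff_getElem.mp ha with ⟨k, hk, rfl⟩
    rw [List.getElem_drop, ← he]
    rcases Nat.eq_zero_or_pos k with hk0 | hk0
    · subst hk0
      have : p + 0 = p := by omega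
      simp [this, pvLex_irrefl]
    · have hlx := hpe p (p + k) hlt (by rw [List.length_drop] at hk; omega) (by omega)
      simp [pvLex_asymm hlx]
  omega

-- a conditional +1 fold is countP
theorem pv_foldl_add (p : Int → Prop) [DecidablePred p] (l : List Int) (a : Int) :
    l.foldl (fun d j => if p j then d + 1 else d) a = a + (l.countP (fun j => decide (p j)) : Int) := by
  induction l generalizing a with
  | nil => simp
  | cons x xs ih =>
    by_cases h : p x <;> simp [h, ih] <;> push_cast <;> ring

-- a conditional -1 fold is minus countP
theorem pv_foldl_sub (p : Int → Prop) [DecidablePred p] (l : List Int) (a : Int) :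
    l.foldl (fun d j => if p j then d - 1 else d) a = a - (l.countP (fun j => decide (p j)) : Int) := by
  induction l generalizing a with
  | nil => simp
  | cons x xs ih =>
    by_cases h : p x <;> simp [h, ih] <;> push_cast <;> ring

-- counting a negated predicate
theorem pv_countP_not (p : Int → Bool) (l : List Int) :
    l.countP (fun x => !(p x)) = l.length - l.countP p := by
  induction l with
  | nil => simp
  | cons x xs ih =>
    have hle := List.countP_le_length (p := p) (l := xs)
    by_cases h : p x <;> simp [List.countP_cons, h, ih] <;> omega

-- the lex-rank of element i inside the whole index range, split at i:
-- (number of lex-smaller elements) = i - (earlier greater) + (later smaller)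
theorem pv_count_split (A : List Int) (i : Int) (h0 : 0 ≤ i) (h1 : i < (A.length : Int)) :
    ((PySem.List.pyRange 0 (A.length : Int) 1).countP
        (fun j => pvLex (PySem.List.pyGetD A j 0, j + 1) (PySem.List.pyGetD A i 0, i + 1)) : Int)
    = i - ((PySem.List.pyRange 0 i 1).countP
          (fun j => decide (PySem.List.pyGetD A j 0 > PySem.List.pyGetD A i 0)) : Int)
      + ((PySem.List.pyRange (i + 1) (A.length : Int) 1).countP
          (fun j => decide (PySem.List.pyGetD A j 0 < PySem.List.pyGetD A i 0)) : Int) := by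
  rw [PySem.List.pyRange_one_append 0 i (A.length : Int) h0 (le_of_lt h1),
      PySem.List.pyRange_one_cons h1, List.countP_append, List.countP_cons]
  have hseg1 : (PySem.List.pyRange 0 i 1).countP
        (fun j => pvLex (PySem.List.pyGetD A j 0, j + 1) (PySem.List.pyGetD A i 0, i + 1))
      = (PySem.List.pyRange 0 i 1).countP
        (fun j => !(decide (PySem.List.pyGetD A j 0 > PySem.List.pyGetD A i 0))) := by
    apply List.countP_congr
    intro j hj
    have hjm := (PySem.List.mem_pyRange_one).mp hj
    simp only [pvLex, gt_iff_lt]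
    by_cases ha : PySem.List.pyGetD A j 0 < PySem.List.pyGetD A i 0 <;>
      by_cases hb : PySem.List.pyGetD A j 0 = PySem.List.pyGetD A i 0 <;>
        simp [ha, hb] <;> omega
  have hseg2 : (PySem.List.pyRange (i + 1) (A.length : Int) 1).countP
        (fun j => pvLex (PySem.List.pyGetD A j 0, j + 1) (PySem.List.pyGetD A i 0, i + 1))
      = (PySem.List.pyRange (i + 1) (A.length : Int) 1).countP
        (fun j => decide (PySem.List.pyGetD A j 0 < PySem.List.pyGetD A i 0)) := by
    apply List.countP_congr
    intro j hj
    have hjm := (PySem.List.mem_pyRange_one).mp hj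
    simp only [pvLex]
    by_cases ha : PySem.List.pyGetD A j 0 < PySem.List.pyGetD A i 0 <;>
      by_cases hb : PySem.List.pyGetD A j 0 = PySem.List.pyGetD A i 0 <;>
        simp [ha, hb] <;> omega
  rw [hseg1, hseg2, pv_countP_not]
  have hlen : (PySem.List.pyRange 0 i 1).length = i.toNat := by
    rw [PySem.List.length_pyRange_one]; congr 1; omega
  have hle : (PySem.List.pyRange 0 i 1).countP
      (fun j => decide (PySem.List.pyGetD A j 0 > PySem.List.pyGetD A i 0))
      ≤ (PySem.List.pyRange 0 i 1).length := List.countP_le_length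
  rw [hlen] at hle ⊢
  simp only [pvLex_irrefl, if_false, Bool.false_eq_true]
  omega

-- ===== VERDICT (by name: the statement is the Claim_ definition above) =====
theorem solve_spec : Claim_equal_solve := by
  intro N A _
  show solve N A = solve_alt N A
  simp only [solve, solve_alt]
  set n : Int := (A.length : Int) with hn
  set g : Int → Int × Int := fun i => (PySem.List.pyGetD A i 0, i + 1) with hg
  -- A's pair list is the index range mapped through g
  have harr : (PySem.List.enumerate A 1).map (fun p => (p.2, p.1))
      = (PySem.List.pyRange 0 n 1).map g := by
    apply List.ext_getElem
    · simp [PySem.List.length_enumerate, PySem.List.length_pyRange_one, hn]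
    · intro k h1 h2
      have hk : k < A.length := by simpa [PySem.List.length_enumerate] using h1
      simp only [List.getElem_map, PySem.List.getElem_enumerate, PySem.List.getElem_pyRange_one, hg]
      refine Prod.ext ?_ ?_
      · show A[k] = PySem.List.pyGetD A (0 + (k:Int)) 0
        rw [PySem.List.pyGetD_eq_getElem A 0 (by omega) (by omega)]
        congr 1; omega
      · show (1 : Int) + k = 0 + (k:Int) + 1
        omega
  rw [harr]
  set arr := (PySem.List.pyRange 0 n 1).map g with harrdef
  set s := PySem.List.sorted arr (fun x => x.1) false with hs
  have hperm : s.Perm arr := PySem.List.sorted_perm _ _ _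
  -- s is lex-sorted: the fold inserts pairs of strictly increasing index
  have hpw : s.Pairwise (fun a b => pvLex a b = true) := by
    rw [hs]
    apply pv_sorted_pairwise
    rw [harrdef]
    exact (PySem.List.pairwise_lt_pyRange_one 0 n).map g
      (fun a b hab => by simp only [hg]; omega)
  -- the function of the element alone that gives its displacement
  set F : Int × Int → Int := fun e => e.2 - (arr.countP (fun y => pvLex y e) : Int) - 1 with hF
  -- A's displacement list is s mapped through F
  have hdisp : (PySem.List.enumerate s 1).map (fun q => q.2.2 - q.1) = s.map F := by
    apply List.ext_getElem
    · simp [PySem.List.length_enumerate]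
    · intro p h1 h2
      have hps : p < s.length := by simpa using h2
      simp only [List.getElem_map, PySem.List.getElem_enumerate, hF]
      have hc : arr.countP (fun y => pvLex y s[p]) = p := by
        rw [← hperm.countP_eq]
        exact pv_pos_countP s hpw p hps
      rw [hc]
      show s[p].2 - (1 + (p : Int)) = s[p].2 - p - 1
      omega
  -- rewrite A's fold as a max fold over that list
  have hifA : (fun (m : Int) (q : Int × Int × Int) => if q.2.2 - q.1 > m then q.2.2 - q.1 else m)
      = fun m q => max m ((fun (q : Int × Int × Int) => q.2.2 - q.1) q) := by
    funext m q
    by_cases h : q.2.2 - q.1 > m <;> simp [h] <;> omega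
  rw [hifA, ← List.foldl_map, hdisp]
  -- permute it back to original order, then expose the per-index function
  have hmp : (s.map F).Perm (arr.map F) := hperm.map F
  rw [hmp.foldl_eq 0, harrdef, List.map_map, List.foldl_map]
  -- B's per-index displacement
  set D : Int → Int := fun i =>
      (((PySem.List.pyRange 0 i 1).countP
          (fun j => decide (PySem.List.pyGetD A j 0 > PySem.List.pyGetD A i 0)) : Int)
        - ((PySem.List.pyRange (i + 1) n 1).countP
          (fun j => decide (PySem.List.pyGetD A j 0 < PySem.List.pyGetD A i 0)) : Int)) with hD
  -- B's body is a max fold of D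
  have hBeq : (fun (best i : Int) =>
      let d : Int := (PySem.List.pyRange 0 i 1).foldl
        (fun d j => if PySem.List.pyGetD A j 0 > PySem.List.pyGetD A i 0 then d + 1 else d) 0
      let d : Int := (PySem.List.pyRange (i + 1) n 1).foldl
        (fun d j => if PySem.List.pyGetD A j 0 < PySem.List.pyGetD A i 0 then d - 1 else d) d
      if d > best then d else best) = fun best i => max best (D i) := by
    funext best i
    simp only [pv_foldl_add, pv_foldl_sub, zero_add, hD]
    split_ifs with h
    · omega
    · omega
  rw [hBeq]
  congr 1
  apply PySem.List.foldl_congr_mem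
  intro m i hi
  have hmem := (PySem.List.mem_pyRange_one).mp hi
  have key := pv_count_split A i hmem.1 hmem.2
  rw [← hn] at key
  simp only [Function.comp_def, hF, harrdef, List.countP_map, hg, hD]
  rw [key]
  omega
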